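-- pv_equiv track=rewrite | github.com/hxmKevin/NNW | Sendintegral/auto_present_credit_in_return.py | deal_multi_customer
-- ===== SOURCE A (Python) =====
-- def deal_multi_customer(customer_data_list):
--     list = {}
--     list['group_id_exists_2_3'] = []
--     list['group_lv_exists_1'] = []
--     i = 0
--
--     for customer_data in customer_data_list:
--         i += 1
--         if i == 1:
--             list['old'] = customer_data
--         if "group_id" in customer_data:
--             if customer_data['group_id'] == 2 or customer_data['group_id'] == 3:
--                 list['group_id_exists_2_3'].append(customer_data)
--
--         if "group_lv" in customer_data:
--             if customer_data['group_lv'] == 1: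
--                 list['group_lv_exists_1'].append(customer_data)
--
--     if list['group_lv_exists_1']:
--         return list['group_lv_exists_1'].pop(0)
--     elif list['group_id_exists_2_3']:
--         return list['group_id_exists_2_3'].pop(0)
--
--     return list['old']
-- ===== SOURCE B (Python) =====
-- def deal_multi_customer(customer_data_list):
--     for c in customer_data_list:
--         if c.get('group_lv') == 1:
--             return c
--     for c in customer_data_list:
--         if c.get('group_id') in (2, 3):
--             return c
--     return customer_data_list[0]
-- ===== Notes on version B (the rewrite author's own statement) =====
-- stated objective: simpler
-- what changed: Two direct first-match scans (first dict with group_lv==1, else first with group_id in (2,3), else the first element) replace A's single pass that builds a dict of two accumulated candidate lists plus a counter and then pops from them.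
-- outside the precondition, e.g. on deal_multi_customer([]): A raises KeyError, B raises IndexError
import Mathlib
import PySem

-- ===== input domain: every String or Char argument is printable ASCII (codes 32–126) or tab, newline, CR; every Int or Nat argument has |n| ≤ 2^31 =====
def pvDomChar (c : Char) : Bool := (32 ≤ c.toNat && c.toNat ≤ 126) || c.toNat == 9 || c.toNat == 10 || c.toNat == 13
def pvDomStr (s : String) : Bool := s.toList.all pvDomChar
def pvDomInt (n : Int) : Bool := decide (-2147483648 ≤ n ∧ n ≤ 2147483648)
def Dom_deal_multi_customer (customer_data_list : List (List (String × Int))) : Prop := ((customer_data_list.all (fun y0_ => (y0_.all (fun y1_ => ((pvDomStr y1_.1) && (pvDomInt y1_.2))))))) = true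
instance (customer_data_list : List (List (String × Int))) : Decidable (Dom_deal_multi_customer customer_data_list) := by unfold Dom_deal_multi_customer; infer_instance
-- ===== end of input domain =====

-- B replaces A's single accumulating pass (dict of two candidate lists + counter, then pop) by
-- two direct first-match scans with a first-element fallback (objective: simpler).

-- ===== PORT A =====

-- each Python customer dict is an association list; lookup = first match (Python dict semantics)
def pvGetV? (c : List (String × Int)) (k : String) : Option Int :=
  (c.find? (fun p => p.1 == k)).map (·.2)

-- loop state: (list['old'], list['group_id_exists_2_3'], list['group_lv_exists_1'], i)
def pvStepA (s : Option (List (String × Int)) × List (List (String × Int)) × List (List (String × Int)) × Int)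
    (c : List (String × Int)) :
    Option (List (String × Int)) × List (List (String × Int)) × List (List (String × Int)) × Int :=
  let i := s.2.2.2 + 1
  let old := if i = 1 then some c else s.1
  -- if "group_id" in customer_data: if c['group_id'] == 2 or == 3: append
  let g23 := match pvGetV? c "group_id" with
    | some v => if v = 2 || v = 3 then s.2.1 ++ [c] else s.2.1
    | none => s.2.1
  -- if "group_lv" in customer_data: if c['group_lv'] == 1: append
  let lv1 := match pvGetV? c "group_lv" with
    | some v => if v = 1 then s.2.2.1 ++ [c] else s.2.2.1
    | none => s.2.2.1
  (old, g23, lv1, i)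

def deal_multi_customer (customer_data_list : List (List (String × Int))) : List (String × Int) :=
  let st := customer_data_list.foldl pvStepA (none, [], [], 0)
  if st.2.2.1 ≠ [] then st.2.2.1.headD []          -- list['group_lv_exists_1'].pop(0)
  else if st.2.1 ≠ [] then st.2.1.headD []          -- list['group_id_exists_2_3'].pop(0)
  else st.1.getD []                                 -- list['old'] (KeyError when none: outside Pre_)

-- ===== PORT B =====
def pvIsLv1 (c : List (String × Int)) : Bool := pvGetV? c "group_lv" == some 1
def pvIsG23 (c : List (String × Int)) : Bool :=
  pvGetV? c "group_id" == some 2 || pvGetV? c "group_id" == some 3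

def deal_multi_customer_alt (customer_data_list : List (List (String × Int))) : List (String × Int) :=
  match customer_data_list.find? pvIsLv1 with
  | some c => c
  | none =>
    match customer_data_list.find? pvIsG23 with
    | some c => c
    | none => customer_data_list.headD []           -- customer_data_list[0] (IndexError when empty: outside Pre_)

-- ===== PRECONDITION & SPEC =====
-- A raises KeyError 'old' (and B IndexError) on the empty list; Pre_ excludes exactly that input.
def Pre_deal_multi_customer (customer_data_list : List (List (String × Int))) : Prop :=
  customer_data_list ≠ []
instance (customer_data_list : List (List (String × Int))) : Decidable (Pre_deal_multi_customer customer_data_list) := by unfold Pre_deal_multi_customer; infer_instance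
def pvWitness_deal_multi_customer : (List (List (String × Int))) := [[("group_id", 2)]]

def Spec_deal_multi_customer (customer_data_list : List (List (String × Int))) (out : List (String × Int)) : Prop := out = deal_multi_customer_alt customer_data_list
instance (customer_data_list : List (List (String × Int))) (out : List (String × Int)) : Decidable (Spec_deal_multi_customer customer_data_list out) := by unfold Spec_deal_multi_customer; infer_instance

-- ===== CLAIM (what is proved, stated in full; the proofs are below) =====
def Claim_equal_deal_multi_customer : Prop := ∀ (customer_data_list : List (List (String × Int))), Dom_deal_multi_customer customer_data_list → Pre_deal_multi_customer customer_data_list → Spec_deal_multi_customer customer_data_list (deal_multi_customer customer_data_list)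

-- ===== LEMMAS AND PROOFS =====

-- A's g23/lv1 updates are appends under B's predicates
lemma pvStepA_eq (s : Option (List (String × Int)) × List (List (String × Int)) × List (List (String × Int)) × Int)
    (c : List (String × Int)) :
    pvStepA s c = (if s.2.2.2 + 1 = 1 then some c else s.1,
                   if pvIsG23 c then s.2.1 ++ [c] else s.2.1,
                   if pvIsLv1 c then s.2.2.1 ++ [c] else s.2.2.1,
                   s.2.2.2 + 1) := by
  unfold pvStepA pvIsG23 pvIsLv1
  rcases hg : pvGetV? c "group_id" with _ | v <;>
    rcases hl : pvGetV? c "group_lv" with _ | w <;>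
    simp [hg, hl] <;> split_ifs <;> simp_all <;> omega

-- the loop invariant: once i ≥ 1, 'old' is frozen and the two lists accumulate filters
lemma pvFoldA_inv (l : List (List (String × Int))) (o : List (String × Int))
    (g v : List (List (String × Int))) (i : Int) (hi : 1 ≤ i) :
    l.foldl pvStepA (some o, g, v, i)
      = (some o, g ++ l.filter pvIsG23, v ++ l.filter pvIsLv1, i + l.length) := by
  induction l generalizing g v i with
  | nil => simp
  | cons c rest ih =>
    rw [List.foldl_cons, pvStepA_eq]
    have h1 : ¬ (i + 1 = 1) := by omega
    simp only [h1, if_false]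
    rw [ih _ _ _ (by omega)]
    simp [List.filter_cons]
    constructor
    · split_ifs <;> simp
    · constructor
      · split_ifs <;> simp
      · omega

-- find? is the head of the filtered list
lemma pvFind?_eq_head?_filter {α : Type} (p : α → Bool) (l : List α) :
    l.find? p = (l.filter p).head? := by
  induction l with
  | nil => rfl
  | cons c rest ih =>
    rw [List.filter_cons]
    by_cases h : p c
    · simp [List.find?_cons, h]
    · simp only [List.find?_cons, h, if_neg, Bool.false_eq_true, if_false, cond_false, ih]

-- ===== VERDICT (by name: the statement is the Claim_ definition above) =====
theorem deal_multi_customer_spec : Claim_equal_deal_multi_customer := by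
  intro l _ hpre
  unfold Spec_deal_multi_customer
  cases l with
  | nil => exact absurd rfl hpre
  | cons c rest =>
    unfold deal_multi_customer deal_multi_customer_alt
    rw [List.foldl_cons, pvStepA_eq]
    have h01 : ((0 : Int) + 1 = 1) := by norm_num
    simp only [if_pos h01]
    rw [pvFoldA_inv rest c _ _ (0 + 1) (by norm_num)]
    rw [pvFind?_eq_head?_filter, pvFind?_eq_head?_filter]
    simp only [List.filter_cons]
    by_cases hv : pvIsLv1 c <;> by_cases hg : pvIsG23 c <;>
      rcases hfv : rest.filter pvIsLv1 with _ | ⟨x, xs⟩ <;>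
      rcases hfg : rest.filter pvIsG23 with _ | ⟨y, ys⟩ <;>
      simp [hv, hg, hfv, hfg]
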